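-- pv_equiv track=rewrite | github.com/wantonsolutions/replica-selection | plot/library/lib.py | calculateFailedRequests
-- ===== SOURCE A (Python) =====
-- def calculateFailedRequests(time,sent,rec,nid):
--     outstandingAgg = dict()
--     i = 0
--     diff = []
--     while i < len(time):
--         outstandingAgg[str(nid[i])] = sent[i] - rec[i]
--         #outstandingAgg[str(nid[i])] = i
--         s = 0
--         for outstanding in outstandingAgg:
--             s += outstandingAgg[outstanding]
--         diff.append(s)
--         i += 1
--     return diff
-- ===== SOURCE B (Python) =====
-- def calculateFailedRequests(time, sent, rec, nid):
--     # Running total: instead of re-summing the whole dict each step,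
--     # adjust the sum by (new value - old value) of the updated key.
--     vals = {}
--     total = 0
--     diff = []
--     for i in range(len(time)):
--         key = str(nid[i])
--         new = sent[i] - rec[i]
--         total += new - vals.get(key, 0)
--         vals[key] = new
--         diff.append(total)
--     return diff
-- ===== Notes on version B (the rewrite author's own statement) =====
-- stated objective: faster
-- what changed: Replaces the per-step re-summation of all dict entries with a running total updated incrementally (add new value, subtract the key's previous value), turning O(n*k) into O(n).
import Mathlib
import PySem

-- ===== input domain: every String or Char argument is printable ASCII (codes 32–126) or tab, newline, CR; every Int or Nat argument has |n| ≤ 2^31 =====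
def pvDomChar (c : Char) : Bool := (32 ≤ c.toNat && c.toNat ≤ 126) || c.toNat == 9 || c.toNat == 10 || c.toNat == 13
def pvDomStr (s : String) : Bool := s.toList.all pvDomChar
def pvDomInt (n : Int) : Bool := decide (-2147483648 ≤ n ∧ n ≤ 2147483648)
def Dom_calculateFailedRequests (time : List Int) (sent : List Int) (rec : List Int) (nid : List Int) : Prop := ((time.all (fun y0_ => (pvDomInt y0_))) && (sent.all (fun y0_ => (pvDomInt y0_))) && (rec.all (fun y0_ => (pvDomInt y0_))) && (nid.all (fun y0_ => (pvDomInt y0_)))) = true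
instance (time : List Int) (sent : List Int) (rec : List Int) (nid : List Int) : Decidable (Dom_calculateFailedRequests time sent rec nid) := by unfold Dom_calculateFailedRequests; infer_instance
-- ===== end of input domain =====

-- B maintains the dict-value sum incrementally (add new, subtract the key's old value)
-- instead of A's re-summation of the whole dict at every step; equivalence of return
-- values is proved on inputs where A does not raise IndexError.

-- ===== PORT A =====
-- s = 0; for outstanding in outstandingAgg: s += outstandingAgg[outstanding]
def sumValsA (d : PySem.Dict String Int) : Int :=
  d.keys.foldl (fun s k => s + d.getD k 0) 0

-- while i < len(time): outstandingAgg[str(nid[i])] = sent[i] - rec[i]; re-sum dict; append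
def loopA (sent rec nid : List Int) (n : Nat) (i : Nat)
    (d : PySem.Dict String Int) (diff : List Int) : List Int :=
  if _h : i < n then
    loopA sent rec nid n (i + 1)
      (d.insert (PySem.Int.toStr (nid.getD i 0)) (sent.getD i 0 - rec.getD i 0))
      (diff ++ [sumValsA (d.insert (PySem.Int.toStr (nid.getD i 0)) (sent.getD i 0 - rec.getD i 0))])
  else diff
termination_by n - i

def calculateFailedRequests (time : List Int) (sent : List Int) (rec : List Int) (nid : List Int) : List Int :=
  loopA sent rec nid time.length 0 PySem.Dict.empty []

-- ===== PORT B =====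
-- one fold step: total += new - vals.get(key, 0); vals[key] = new; diff.append(total)
def stepB (sent rec nid : List Int) (st : PySem.Dict String Int × Int × List Int) (i : Nat) :
    PySem.Dict String Int × Int × List Int :=
  (st.1.insert (PySem.Int.toStr (nid.getD i 0)) (sent.getD i 0 - rec.getD i 0),
   st.2.1 + ((sent.getD i 0 - rec.getD i 0) - st.1.getD (PySem.Int.toStr (nid.getD i 0)) 0),
   st.2.2 ++ [st.2.1 + ((sent.getD i 0 - rec.getD i 0) - st.1.getD (PySem.Int.toStr (nid.getD i 0)) 0)])

-- for i in range(len(time)): one stepB over the state (vals, total, diff); return diff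
def calculateFailedRequests_alt (time : List Int) (sent : List Int) (rec : List Int) (nid : List Int) : List Int :=
  ((List.range time.length).foldl (stepB sent rec nid) (PySem.Dict.empty, 0, [])).2.2
-- ===== PRECONDITION & SPEC =====
-- Pre_ excludes exactly the inputs where A raises IndexError: sent/rec/nid shorter than time.
def Pre_calculateFailedRequests (time : List Int) (sent : List Int) (rec : List Int) (nid : List Int) : Prop :=
  time.length ≤ sent.length ∧ time.length ≤ rec.length ∧ time.length ≤ nid.length
instance (time : List Int) (sent : List Int) (rec : List Int) (nid : List Int) : Decidable (Pre_calculateFailedRequests time sent rec nid) := by unfold Pre_calculateFailedRequests; infer_instance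

def pvWitness_calculateFailedRequests : List Int × List Int × List Int × List Int :=
  ([0, 1], [3, 5], [1, 2], [7, 7])

def Spec_calculateFailedRequests (time : List Int) (sent : List Int) (rec : List Int) (nid : List Int) (out : List Int) : Prop := out = calculateFailedRequests_alt time sent rec nid
instance (time : List Int) (sent : List Int) (rec : List Int) (nid : List Int) (out : List Int) : Decidable (Spec_calculateFailedRequests time sent rec nid out) := by unfold Spec_calculateFailedRequests; infer_instance

-- ===== CLAIM (what is proved, stated in full; the proofs are below) =====
def Claim_equal_calculateFailedRequests : Prop := ∀ (time : List Int) (sent : List Int) (rec : List Int) (nid : List Int), Dom_calculateFailedRequests time sent rec nid → Pre_calculateFailedRequests time sent rec nid → Spec_calculateFailedRequests time sent rec nid (calculateFailedRequests time sent rec nid)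

-- ===== LEMMAS AND PROOFS =====

lemma sum_map_ite_nodup (k : String) (f : String → Int) (v : Int) :
    ∀ l : List String, l.Nodup → k ∈ l →
      (l.map (fun j => if j = k then v else f j)).sum = (l.map f).sum - f k + v := by
  intro l
  induction l with
  | nil => intro _ hk; cases hk
  | cons a l ih =>
    intro hnd hk
    rcases List.nodup_cons.mp hnd with ⟨ha, hnd'⟩
    rcases List.mem_cons.mp hk with hk | hk
    · subst hk
      have : l.map (fun j => if j = k then v else f j) = l.map f :=
        List.map_congr_left (fun x hx => if_neg (fun (h : x = k) => ha (h ▸ hx)))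
      simp only [List.map_cons, List.sum_cons, this, if_pos]
      ring
    · have hne : a ≠ k := fun h => ha (h ▸ hk)
      simp only [List.map_cons, List.sum_cons, if_neg hne]
      rw [ih hnd' hk]; ring

lemma sum_values_insert (d : PySem.Dict String Int) (k : String) (v : Int)
    (hnd : d.keys.Nodup) :
    ((d.insert k v).values).sum = d.values.sum - d.getD k 0 + v := by
  have hnd' : (d.insert k v).keys.Nodup := PySem.Dict.nodup_keys_insert d k v hnd
  rw [PySem.Dict.values_eq_map_keys (d.insert k v) hnd' 0,
      PySem.Dict.values_eq_map_keys d hnd 0]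
  by_cases hc : d.contains k = true
  · rw [PySem.Dict.keys_insert_of_contains d v hc]
    have hkmem : k ∈ d.keys := (PySem.Dict.contains_iff_mem_keys d k).mp hc
    have := sum_map_ite_nodup k (fun j => d.getD j 0) v d.keys hnd hkmem
    simpa [PySem.Dict.getD_insert] using this
  · have hc' : d.contains k = false := by simpa using hc
    rw [PySem.Dict.keys_insert_of_not_contains d v hc']
    have hknotmem : k ∉ d.keys := fun h =>
      by simp [(PySem.Dict.contains_iff_mem_keys d k).mpr h] at hc'
    have hmap : d.keys.map (fun j => (d.insert k v).getD j 0)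
        = d.keys.map (fun j => d.getD j 0) :=
      List.map_congr_left (fun x hx => by
        rw [PySem.Dict.getD_insert]
        exact if_neg (fun (h : x = k) => hknotmem (h ▸ hx)))
    rw [List.map_append, List.sum_append, hmap]
    simp [PySem.Dict.getD_insert, PySem.Dict.getD_of_not_contains d 0 hc']

lemma dict_fold_sum (d : PySem.Dict String Int) (hnd : d.keys.Nodup) :
    sumValsA d = d.values.sum := by
  unfold sumValsA
  rw [PySem.List.foldl_add d.keys (fun k => d.getD k 0) 0,
      PySem.Dict.values_eq_map_keys d hnd 0]
  simp

lemma loopA_eq_foldB (sent rec nid : List Int) (n : Nat) :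
    ∀ (k i : Nat) (d : PySem.Dict String Int) (total : Int) (diff : List Int),
      n = i + k → d.keys.Nodup → total = d.values.sum →
      loopA sent rec nid n i d diff
        = ((List.range' i k).foldl (stepB sent rec nid) (d, total, diff)).2.2 := by
  intro k
  induction k with
  | zero =>
    intro i d total diff hn _ _
    rw [loopA]
    simp [hn]
  | succ k ih =>
    intro i d total diff hn hnd htot
    have hi : i < n := by omega
    rw [loopA, dif_pos hi, List.range'_succ, List.foldl_cons]
    set key := PySem.Int.toStr (nid.getD i 0) with hkey
    set new := sent.getD i 0 - rec.getD i 0 with hnew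
    have hnd' : (d.insert key new).keys.Nodup := PySem.Dict.nodup_keys_insert d key new hnd
    have hsum : sumValsA (d.insert key new) = (d.insert key new).values.sum :=
      dict_fold_sum _ hnd'
    have hrel : (d.insert key new).values.sum = total + (new - d.getD key 0) := by
      rw [sum_values_insert d key new hnd, htot]; ring
    have hstep : stepB sent rec nid (d, total, diff) i
        = (d.insert key new, total + (new - d.getD key 0),
           diff ++ [total + (new - d.getD key 0)]) := rfl
    rw [hstep, hsum, hrel]
    exact ih (i + 1) (d.insert key new) (total + (new - d.getD key 0))
      (diff ++ [total + (new - d.getD key 0)]) (by omega) hnd' hrel.symm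

-- ===== VERDICT (by name: the statement is the Claim_ definition above) =====
theorem calculateFailedRequests_spec : Claim_equal_calculateFailedRequests := by
  intro time sent rec nid _ _
  unfold Spec_calculateFailedRequests calculateFailedRequests calculateFailedRequests_alt
  rw [loopA_eq_foldB sent rec nid time.length time.length 0 PySem.Dict.empty 0 []
      (by omega) PySem.Dict.nodup_keys_empty rfl]
  rw [List.range_eq_range']
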